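-- pv_equiv track=rewrite | github.com/eternalseptember/CtCI | 05_bit_manipulation/03_flip_bit_to_win/flip_bit_to_win_sol_1.py | get_alternating_sequences
-- ===== SOURCE A (Python) =====
-- def get_alternating_sequences(num):
-- 	# Returns a list of the sixes of the sequences. The sequence starts
-- 	# off with the number of 0's (which might be 0) and then the
-- 	# alternates with the counts of each value.
-- 	seq_list = []
--
-- 	searching_for = 0
-- 	counter = 0
--
-- 	# i in range Integer.BYTES
-- 	for i in range(32 * 8):
-- 		if ((num & 1) != searching_for):
-- 			seq_list.append(counter)
-- 			searching_for = num & 1  # Flip [1 to 0] or [0 to 1].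
-- 			counter = 0
--
-- 		counter += 1
--
-- 		# num >>>= 1; >>> is zero-fill right shift
-- 		num = num >> 1
--
-- 	seq_list.append(counter)
--
-- 	return seq_list
-- ===== SOURCE B (Python) =====
-- def get_alternating_sequences(num):
-- 	# Transition-position method: take the low 256 bits, list the positions
-- 	# where adjacent bits differ (plus the end position 256), and return the
-- 	# adjacent differences of those positions; prepend 0 if bit 0 is 1 so the
-- 	# list starts with the count of 0-bits.
-- 	m = num % (1 << 256)
-- 	bounds = [i + 1 for i in range(256) if ((m >> i) & 1) != ((m >> (i + 1)) & 1)]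
-- 	if ((m >> 255) & 1) == 0:
-- 		bounds.append(256)
-- 	runs = [b - a for a, b in zip([0] + bounds, bounds)]
-- 	return ([0] + runs) if (m & 1) else runs
-- ===== Notes on version B (the rewrite author's own statement) =====
-- stated objective: alternative
-- what changed: Replaces A's streaming flag/counter scan with a transition-position method: mask to the low 256 bits, collect the positions where adjacent bits differ (plus the end position 256), and obtain the run lengths as adjacent differences of those positions; no run counter is ever maintained.
import Mathlib
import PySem

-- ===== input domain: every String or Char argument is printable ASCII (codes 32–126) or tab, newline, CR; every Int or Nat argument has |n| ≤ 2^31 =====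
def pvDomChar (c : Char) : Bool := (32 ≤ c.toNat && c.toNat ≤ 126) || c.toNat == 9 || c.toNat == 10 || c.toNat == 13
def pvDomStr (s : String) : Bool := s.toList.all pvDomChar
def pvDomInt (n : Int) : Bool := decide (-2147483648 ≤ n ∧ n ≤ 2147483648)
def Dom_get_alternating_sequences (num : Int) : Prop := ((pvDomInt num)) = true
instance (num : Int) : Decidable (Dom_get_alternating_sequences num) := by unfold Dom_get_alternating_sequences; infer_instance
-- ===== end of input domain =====

-- B replaces A's streaming flag/counter scan by a transition-position method:
-- mask to 256 bits, list the positions where adjacent bits differ (plus the end),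
-- and take adjacent differences; alternative decomposition, same cost.


-- ===== PORT A =====
def get_alternating_sequences (num : Int) : List Int :=
  let s := (PySem.List.pyRange 0 (32 * 8) 1).foldl
    (fun (st : Int × Int × Int × List Int) _ =>
      let n := st.1
      let sf := st.2.1
      let c := st.2.2.1
      let lst := st.2.2.2
      let (sf, c, lst) :=
        if PySem.Int.band n 1 ≠ sf then (PySem.Int.band n 1, (0 : Int), lst ++ [c])
        else (sf, c, lst)
      let c := c + 1
      let n := n >>> (1 : Nat)
      (n, sf, c, lst))
    (num, 0, 0, [])
  s.2.2.2 ++ [s.2.2.1]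

-- ===== PORT B =====
def get_alternating_sequences_alt (num : Int) : List Int :=
  let m := PySem.Int.mod num ((1 : Int) <<< (256 : Nat))
  let bounds := ((PySem.List.pyRange 0 256 1).filter
      (fun i => PySem.Int.band (m >>> i.toNat) 1 != PySem.Int.band (m >>> (i + 1).toNat) 1)).map
      (fun i => i + 1)
  let bounds := if PySem.Int.band (m >>> (255 : Nat)) 1 == 0 then bounds ++ [256] else bounds
  let runs := (List.zip (0 :: bounds) bounds).map (fun p => p.2 - p.1)
  if PySem.Int.band m 1 != 0 then 0 :: runs else runs

-- ===== PRECONDITION & SPEC =====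
def Spec_get_alternating_sequences (num : Int) (out : List Int) : Prop := out = get_alternating_sequences_alt num
instance (num : Int) (out : List Int) : Decidable (Spec_get_alternating_sequences num out) := by unfold Spec_get_alternating_sequences; infer_instance

-- ===== CLAIM (what is proved, stated in full; the proofs are below) =====
def Claim_equal_get_alternating_sequences : Prop := ∀ (num : Int), Dom_get_alternating_sequences num → Spec_get_alternating_sequences num (get_alternating_sequences num)

-- ===== LEMMAS AND PROOFS =====

-- the low bits of n, lowest first (A side, iterated shift)
def pvBitsOf : Int → Nat → List Int
  | _, 0 => []
  | n, k + 1 => PySem.Int.band n 1 :: pvBitsOf (n >>> (1 : Nat)) k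

-- the bits of m at absolute indices a, a+1, …, a+k-1 (B side)
def pvBitsIdx (m : Int) : Nat → Nat → List Int
  | _, 0 => []
  | a, k + 1 => PySem.Int.band (m >>> a) 1 :: pvBitsIdx m (a + 1) k

-- A's loop body, re-expressed as a recursion over the bit list
def pvLoop : List Int → Int → Int → List Int → List Int
  | [], _, c, acc => acc ++ [c]
  | b :: bs, sf, c, acc =>
      if b ≠ sf then pvLoop bs b 1 (acc ++ [c]) else pvLoop bs sf (c + 1) acc

-- run-length counts with an open current run (value v, count c)
def pvRleGo (v c : Int) : List Int → List Int
  | [] => [c]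
  | y :: ys => if y = v then pvRleGo v (c + 1) ys else c :: pvRleGo y 1 ys

-- head of r, or the sentinel s if r is empty
def pvNext (r : List Int) (s : Int) : Int :=
  match r with | [] => s | y :: _ => y

-- last element of x :: r
def pvLast : Int → List Int → Int
  | x, [] => x
  | _, y :: r => pvLast y r

-- transition positions: compare each element with the next (sentinel s at the end)
def pvTrS (s : Int) : List Int → Int → List Int
  | [], _ => []
  | x :: r, p => (if x = pvNext r s then [] else [p + 1]) ++ pvTrS s r (p + 1)

-- transition positions incl. the end-of-list boundary
def pvTr : List Int → Int → List Int
  | [], _ => []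
  | [_], p => [p + 1]
  | x :: y :: r, p => (if x = y then [] else [p + 1]) ++ pvTr (y :: r) (p + 1)

-- transition positions: compare each element with the previous (v before the list)
def pvTrP : Int → List Int → Int → List Int
  | _, [], p => [p]
  | v, x :: r, p => (if x = v then [] else [p]) ++ pvTrP x r (p + 1)

-- adjacent differences
def pvDiffs : Int → List Int → List Int
  | _, [] => []
  | prev, b :: bs => (b - prev) :: pvDiffs b bs

lemma pvFold_eq_pvLoop (l : List Int) : ∀ (n sf c : Int) (acc : List Int),
    (let s := l.foldl
      (fun (st : Int × Int × Int × List Int) _ =>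
        let n := st.1
        let sf := st.2.1
        let c := st.2.2.1
        let lst := st.2.2.2
        let (sf, c, lst) :=
          if PySem.Int.band n 1 ≠ sf then (PySem.Int.band n 1, (0 : Int), lst ++ [c])
          else (sf, c, lst)
        let c := c + 1
        let n := n >>> (1 : Nat)
        (n, sf, c, lst)) (n, sf, c, acc)
     s.2.2.2 ++ [s.2.2.1]) = pvLoop (pvBitsOf n l.length) sf c acc := by
  induction l with
  | nil => intro n sf c acc; simp [pvBitsOf, pvLoop]
  | cons x xs ih =>
    intro n sf c acc
    simp only [List.foldl_cons, List.length_cons, pvBitsOf, pvLoop]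
    by_cases h : PySem.Int.band n 1 ≠ sf
    · simp only [if_pos h]
      exact ih (n >>> (1 : Nat)) (PySem.Int.band n 1) (0 + 1) (acc ++ [c])
    · simp only [if_neg h]
      exact ih (n >>> (1 : Nat)) sf (c + 1) acc

lemma pvLoop_eq_rleGo : ∀ (bs : List Int) (sf c : Int) (acc : List Int),
    pvLoop bs sf c acc = acc ++ pvRleGo sf c bs := by
  intro bs
  induction bs with
  | nil => intro sf c acc; simp [pvLoop, pvRleGo]
  | cons y ys ih =>
    intro sf c acc
    simp only [pvLoop, pvRleGo]
    by_cases h : y = sf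
    · simp [h, ih]
    · simp [h, ih]

set_option maxRecDepth 100000 in
lemma pvRange_len : (PySem.List.pyRange 0 (32 * 8) 1).length = 256 := by decide

-- pvBitsOf over iterated shifts = pvBitsIdx over absolute indices
lemma pvBitsOf_eq_idx (n : Int) : ∀ (k a : Nat), pvBitsOf (n >>> a) k = pvBitsIdx n a k := by
  intro k
  induction k with
  | zero => intro a; rfl
  | succ k ih =>
    intro a
    simp only [pvBitsOf, pvBitsIdx, ← Int.shiftRight_add, ih (a + 1)]

-- bit agreement between num and m = num % 2^256 below index 256
lemma pvModBit (num : Int) (a : Nat) (ha : a < 256) :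
    PySem.Int.band (PySem.Int.mod num ((1 : Int) <<< (256 : Nat)) >>> a) 1
      = PySem.Int.band (num >>> a) 1 := by
  have hT : ((1 : Int) <<< (256 : Nat)) = 2 ^ 256 := by rw [Int.shiftLeft_eq]; norm_num
  have hTpos : (0 : Int) < 2 ^ 256 := by positivity
  rw [hT, PySem.Int.mod_eq_emod_of_pos hTpos, PySem.Int.band_one, PySem.Int.band_one,
      PySem.Int.mod_eq_emod_of_pos (by omega : (0 : Int) < 2),
      PySem.Int.mod_eq_emod_of_pos (by omega : (0 : Int) < 2),
      Int.shiftRight_eq_div_pow, Int.shiftRight_eq_div_pow]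
  have hpow : (((2 ^ a : Nat)) : Int) = (2 : Int) ^ a := by push_cast; ring
  rw [hpow]
  have hq : num = num % 2 ^ 256 + (num / 2 ^ 256) * 2 ^ 256 := by rw [mul_comm]; omega
  have hsplit : (2 : Int) ^ 256 = 2 * 2 ^ (255 - a) * 2 ^ a := by
    rw [show (256 : ℕ) = (1 + (255 - a)) + a by omega, pow_add, pow_add, pow_one]
  have key : num / (2 : Int) ^ a = (num % 2 ^ 256) / 2 ^ a + (num / 2 ^ 256) * (2 * 2 ^ (255 - a)) := by
    conv_lhs => rw [hq]
    rw [show (num / 2 ^ 256) * 2 ^ 256 = ((num / 2 ^ 256) * (2 * 2 ^ (255 - a))) * 2 ^ a by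
      rw [hsplit]; ring]
    exact Int.add_mul_ediv_right _ _ (by positivity)
  rw [key]
  have hw : (num / 2 ^ 256) * (2 * 2 ^ (255 - a)) = ((num / 2 ^ 256) * 2 ^ (255 - a)) * 2 := by ring
  rw [hw]
  generalize (num % 2 ^ 256) / (2 : Int) ^ a = u
  generalize (num / 2 ^ 256) * (2 : Int) ^ (255 - a) = w
  omega

-- zip-of-shifted-list differences = pvDiffs
lemma pvZip_eq_diffs : ∀ (bounds : List Int) (prev : Int),
    (List.zip (prev :: bounds) bounds).map (fun p => p.2 - p.1) = pvDiffs prev bounds := by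
  intro bounds
  induction bounds with
  | nil => intro prev; rfl
  | cons b bs ih =>
    intro prev
    simp only [List.zip_cons_cons, List.map_cons, pvDiffs]
    rw [ih b]

-- run-length counts = adjacent differences of prev-compare transition positions
lemma pvRleGo_eq_diffs : ∀ (L : List Int) (v c p : Int),
    pvRleGo v c L = pvDiffs (p - c) (pvTrP v L p) := by
  intro L
  induction L with
  | nil => intro v c p; simp [pvRleGo, pvTrP, pvDiffs]
  | cons x r ih =>
    intro v c p
    simp only [pvRleGo, pvTrP]
    by_cases h : x = v
    · simp only [h]
      have := ih v (c + 1) (p + 1)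
      rw [show p + 1 - (c + 1) = p - c by ring] at this
      simpa using this
    · simp only [if_neg h, List.singleton_append, pvDiffs]
      have := ih x 1 (p + 1)
      rw [show p + 1 - 1 = p by ring] at this
      rw [← this]
      congr 1
      ring

-- prev-compare transitions after the head = next-compare transitions from the head
lemma pvTrP_cons : ∀ (r : List Int) (x : Int) (p : Int),
    pvTrP x r (p + 1) = pvTr (x :: r) p := by
  intro r
  induction r with
  | nil => intro x p; rfl
  | cons y r' ih =>
    intro x p
    simp only [pvTrP, pvTr, ih y (p + 1)]
    by_cases h : x = y
    · simp [h]
    · simp [h, Ne.symm h]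

-- pvTr = sentinel-0 next-compare transitions plus the end boundary when the last bit is 0
lemma pvTr_eq_trS : ∀ (r : List Int) (x : Int) (p : Int),
    pvTr (x :: r) p
      = pvTrS 0 (x :: r) p ++ (if pvLast x r = 0 then [p + ((r.length : Int) + 1)] else []) := by
  intro r
  induction r with
  | nil =>
    intro x p
    by_cases h : x = 0 <;> simp [pvTr, pvTrS, pvNext, pvLast, h]
  | cons y r' ih =>
    intro x p
    simp only [pvTr, pvTrS, pvNext, pvLast, List.length_cons, ih y (p + 1), List.append_assoc]
    push_cast
    ring_nf

-- head sentinel of pvBitsIdx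
lemma pvNext_bitsIdx (m : Int) : ∀ (k a : Nat),
    pvNext (pvBitsIdx m a k) (PySem.Int.band (m >>> (a + k)) 1) = PySem.Int.band (m >>> a) 1 := by
  intro k a
  cases k with
  | zero => simp [pvBitsIdx, pvNext]
  | succ k => rfl

-- last element of pvBitsIdx
lemma pvLast_bitsIdx (m : Int) : ∀ (k a : Nat),
    pvLast (PySem.Int.band (m >>> a) 1) (pvBitsIdx m (a + 1) k) = PySem.Int.band (m >>> (a + k)) 1 := by
  intro k
  induction k with
  | zero => intro a; simp [pvBitsIdx, pvLast]
  | succ k ih =>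
    intro a
    have hstep : pvBitsIdx m (a + 1) (k + 1)
        = PySem.Int.band (m >>> (a + 1)) 1 :: pvBitsIdx m (a + 1 + 1) k := rfl
    rw [hstep]
    show pvLast (PySem.Int.band (m >>> (a + 1)) 1) (pvBitsIdx m (a + 1 + 1) k) = _
    rw [ih (a + 1)]
    congr 2
    omega

-- length of pvBitsIdx
lemma pvLen_bitsIdx (m : Int) : ∀ (k a : Nat), (pvBitsIdx m a k).length = k := by
  intro k
  induction k with
  | zero => intro a; rfl
  | succ k ih => intro a; simp [pvBitsIdx, ih (a + 1)]

-- B's filter/map over the range = sentinel next-compare transitions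
lemma pvFilter_eq_trS (m : Int) : ∀ (k a : Nat),
    (((PySem.List.pyRange (a : Int) ((a : Int) + (k : Int)) 1).filter
        (fun i => PySem.Int.band (m >>> i.toNat) 1 != PySem.Int.band (m >>> (i + 1).toNat) 1)).map
        (fun i => i + 1))
      = pvTrS (PySem.Int.band (m >>> (a + k)) 1) (pvBitsIdx m a k) (a : Int) := by
  intro k
  induction k with
  | zero =>
    intro a
    rw [show ((a : Int) + ((0 : Nat) : Int)) = (a : Int) by simp]
    simp [PySem.List.pyRange, pvBitsIdx, pvTrS]
  | succ k ih =>
    intro a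
    rw [PySem.List.pyRange_one_cons (by push_cast; omega)]
    have hsh : ∀ (j : Nat), m >>> ((j : Int)) = m >>> j := fun j => Int.shiftRight_natCast_right m j
    have hbits : pvBitsIdx m a (k + 1)
        = PySem.Int.band (m >>> a) 1 :: pvBitsIdx m (a + 1) k := rfl
    rw [hbits]
    simp only [List.filter_cons, pvTrS]
    rw [show a + (k + 1) = (a + 1) + k by omega, pvNext_bitsIdx m k (a + 1)]
    have e1 : ((a : Int)).toNat = a := Int.toNat_natCast a
    have e3 : ((a : Int) + 1).toNat = a + 1 := by omega
    have e2 : ((a : Int) + 1) = ((a + 1 : Nat) : Int) := by push_cast; ring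
    have hbound : ((a : Int) + ((k + 1 : Nat) : Int)) = (((a + 1 : Nat)) : Int) + ((k : Nat) : Int) := by
      push_cast; ring
    have ihr := ih (a + 1)
    simp only [hsh] at ihr
    simp only [e1, e3, hsh]
    rw [hbound, e2]
    by_cases h : PySem.Int.band (m >>> a) 1 = PySem.Int.band (m >>> (a + 1)) 1
    · simp only [h, bne_self_eq_false, Bool.false_eq_true, if_false]
      exact ihr
    · have hb : (PySem.Int.band (m >>> a) 1 != PySem.Int.band (m >>> (a + 1)) 1) = true := by
        simpa using h
      simp only [hb, if_true, if_neg h, List.map_cons, List.singleton_append]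
      rw [ihr, e2]

-- bit 256 of m is 0
lemma pvBit256 (num : Int) :
    PySem.Int.band (PySem.Int.mod num ((1 : Int) <<< (256 : Nat)) >>> (256 : Nat)) 1 = 0 := by
  have hT : ((1 : Int) <<< (256 : Nat)) = 2 ^ 256 := by rw [Int.shiftLeft_eq]; norm_num
  have hTpos : (0 : Int) < 2 ^ 256 := by positivity
  rw [hT, PySem.Int.mod_eq_emod_of_pos hTpos, Int.shiftRight_eq_div_pow,
      show (((2 ^ 256 : Nat)) : Int) = (2 : Int) ^ 256 by norm_cast,
      Int.ediv_eq_zero_of_lt (Int.emod_nonneg num (by positivity)) (Int.emod_lt_of_pos num hTpos)]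
  decide

-- proof-side names for B's intermediate values
def pvBoundsF (m : Int) : List Int :=
  ((PySem.List.pyRange 0 256 1).filter
      (fun i => PySem.Int.band (m >>> i.toNat) 1 != PySem.Int.band (m >>> (i + 1).toNat) 1)).map
      (fun i => i + 1)

def pvBounds2 (m : Int) : List Int :=
  if PySem.Int.band (m >>> (255 : Nat)) 1 == 0 then pvBoundsF m ++ [256] else pvBoundsF m

def pvRuns (m : Int) : List Int :=
  (List.zip (0 :: pvBounds2 m) (pvBounds2 m)).map (fun p => p.2 - p.1)

lemma pvAlt_unfold (num : Int) : get_alternating_sequences_alt num =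
    (if PySem.Int.band (PySem.Int.mod num ((1 : Int) <<< (256 : Nat))) 1 != 0
      then 0 :: pvRuns (PySem.Int.mod num ((1 : Int) <<< (256 : Nat)))
      else pvRuns (PySem.Int.mod num ((1 : Int) <<< (256 : Nat)))) := rfl

-- ===== VERDICT (by name: the statement is the Claim_ definition above) =====
theorem get_alternating_sequences_spec : Claim_equal_get_alternating_sequences := by
  intro num _
  unfold Spec_get_alternating_sequences get_alternating_sequences
  rw [pvAlt_unfold num]
  rw [pvFold_eq_pvLoop (PySem.List.pyRange 0 (32 * 8) 1) num 0 0 [], pvRange_len]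
  rw [pvLoop_eq_rleGo, List.nil_append]
  set m := PySem.Int.mod num ((1 : Int) <<< (256 : Nat)) with hm
  -- A's bit list equals B's bit list (indices below 256 agree after the mod)
  have hbitsA : pvBitsOf num 256 = pvBitsIdx m 0 256 := by
    have h1 : pvBitsOf num 256 = pvBitsIdx num 0 256 := by
      have := pvBitsOf_eq_idx num 256 0
      rwa [Int.shiftRight_zero] at this
    rw [h1]
    have hall : ∀ (k a : Nat), a + k ≤ 256 → pvBitsIdx num a k = pvBitsIdx m a k := by
      intro k
      induction k with
      | zero => intro a _; rfl
      | succ k ih =>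
        intro a hak
        have hbn : pvBitsIdx num a (k + 1)
            = PySem.Int.band (num >>> a) 1 :: pvBitsIdx num (a + 1) k := rfl
        have hbm : pvBitsIdx m a (k + 1)
            = PySem.Int.band (m >>> a) 1 :: pvBitsIdx m (a + 1) k := rfl
        rw [hbn, hbm, ih (a + 1) (by omega), hm, pvModBit num a (by omega)]
    exact hall 256 0 (by omega)
  -- identify B's bounds with pvTrS (sentinel 0 = bit 256 of m)
  have hfilter : pvBoundsF m = pvTrS 0 (pvBitsIdx m 0 256) 0 := by
    have h := pvFilter_eq_trS m 256 0
    rw [show ((0 : Nat) + 256) = 256 by omega] at h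
    rw [hm, pvBit256 num, ← hm] at h
    simp only [Nat.cast_zero, Nat.cast_ofNat, zero_add] at h
    unfold pvBoundsF
    exact h
  have hbits256 : pvBitsIdx m 0 256 = PySem.Int.band (m >>> (0 : Nat)) 1 :: pvBitsIdx m 1 255 := rfl
  have hlast : pvLast (PySem.Int.band (m >>> (0 : Nat)) 1) (pvBitsIdx m 1 255)
      = PySem.Int.band (m >>> (255 : Nat)) 1 := by
    simpa using pvLast_bitsIdx m 255 0
  have hTr : pvTr (pvBitsIdx m 0 256) 0
      = pvTrS 0 (pvBitsIdx m 0 256) 0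
        ++ (if PySem.Int.band (m >>> (255 : Nat)) 1 = 0 then [(256 : Int)] else []) := by
    rw [hbits256, pvTr_eq_trS, hlast]
    have hlenval : ((pvBitsIdx m 1 255).length : Int) + 1 = 256 := by
      rw [pvLen_bitsIdx m 255 1]; norm_num
    rw [hlenval, ← hbits256]
    norm_num
  -- B's bounds (with the conditional end append) = pvTr
  have hboundsB : pvBounds2 m = pvTr (pvBitsIdx m 0 256) 0 := by
    unfold pvBounds2
    rw [hfilter, hTr]
    by_cases h : PySem.Int.band (m >>> (255 : Nat)) 1 = 0
    · simp [h]
    · simp [h]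
  have hruns : pvRuns m = pvDiffs 0 (pvTr (pvBitsIdx m 0 256) 0) := by
    unfold pvRuns
    rw [pvZip_eq_diffs, hboundsB]
  rw [hbitsA, hruns]
  -- A's side: rle from (0,0) = diffs of prev-compare transitions from 0
  rw [pvRleGo_eq_diffs (pvBitsIdx m 0 256) 0 0 0]
  rw [show (0 : Int) - 0 = 0 by ring]
  rw [hbits256]
  simp only [pvTrP]
  rw [pvTrP_cons (pvBitsIdx m 1 255) (PySem.Int.band (m >>> (0 : Nat)) 1) 0, ← hbits256]
  have hb0 : m >>> (0 : Nat) = m := Int.shiftRight_zero m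
  by_cases h : PySem.Int.band m 1 = 0
  · rw [hb0, if_pos h, List.nil_append, if_neg (by simp [h])]
  · rw [hb0, if_neg h, List.singleton_append,
      show pvDiffs 0 ((0 : Int) :: pvTr (pvBitsIdx m 0 256) 0)
          = ((0 : Int) - 0) :: pvDiffs 0 (pvTr (pvBitsIdx m 0 256) 0) from rfl,
      if_pos (by simpa using h), show ((0 : Int) - 0) = 0 by ring]
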